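-- pv_equiv track=rewrite | github.com/Sathwik11-hub/AI-Powered-Personalization-cooking-assistant | src/image_recognition.py | suggest_cooking_methods
-- ===== SOURCE A (Python) =====
-- from typing import List, Dict, Any, Tuple
--
-- def suggest_cooking_methods(ingredients: List[str]) -> List[str]:
--     """Suggest cooking methods based on identified ingredients"""
--     cooking_methods = []
--
--     # Method suggestions based on ingredients
--     method_mappings = {
--         'stir_fry': ['vegetables', 'bell pepper', 'broccoli', 'carrot'],
--         'salad': ['lettuce', 'cucumber', 'tomato', 'avocado'],
--         'soup': ['onion', 'carrot', 'celery', 'broth'],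
--         'pasta': ['pasta', 'noodles', 'tomato', 'cheese'],
--         'grilling': ['chicken', 'beef', 'fish', 'vegetables'],
--         'baking': ['chicken', 'fish', 'potato', 'vegetables'],
--         'steaming': ['broccoli', 'cauliflower', 'fish', 'vegetables'],
--         'roasting': ['potato', 'carrot', 'chicken', 'beef']
--     }
--
--     ingredient_set = set(ing.lower() for ing in ingredients)
--
--     for method, method_ingredients in method_mappings.items():
--         if any(ing in ingredient_set for ing in method_ingredients):
--             cooking_methods.append(method.replace('_', ' ').title())
--
--     return cooking_methods
-- ===== SOURCE B (Python) =====
-- # Inverted index: each keyword maps directly to the (index) set of methods it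
-- # triggers, and the display names are precomputed; one dict probe per ingredient.
--
-- _METHOD_NAMES = ['Stir Fry', 'Salad', 'Soup', 'Pasta',
--                  'Grilling', 'Baking', 'Steaming', 'Roasting']
--
-- _KEYWORD_METHODS = {
--     'vegetables': {0, 4, 5, 6},
--     'bell pepper': {0},
--     'broccoli': {0, 6},
--     'carrot': {0, 2, 7},
--     'lettuce': {1},
--     'cucumber': {1},
--     'tomato': {1, 3},
--     'avocado': {1},
--     'onion': {2},
--     'celery': {2},
--     'broth': {2},
--     'pasta': {3},
--     'noodles': {3},
--     'cheese': {3},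
--     'chicken': {4, 5, 7},
--     'beef': {4, 7},
--     'fish': {4, 5, 6},
--     'potato': {5, 7},
--     'cauliflower': {6},
-- }
--
-- def suggest_cooking_methods(ingredients):
--     """Suggest cooking methods based on identified ingredients"""
--     triggered = set()
--     for ing in ingredients:
--         triggered |= _KEYWORD_METHODS.get(ing.lower(), set())
--     return [name for i, name in enumerate(_METHOD_NAMES) if i in triggered]
-- ===== Notes on version B (the rewrite author's own statement) =====
-- stated objective: alternative
-- what changed: Replaces A's per-method rescans of keyword lists against the lowered-ingredient set by a precomputed inverted index mapping each keyword to the index set of methods it triggers, probed once per ingredient, with the titled method names precomputed in a fixed ordered list.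
import Mathlib
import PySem

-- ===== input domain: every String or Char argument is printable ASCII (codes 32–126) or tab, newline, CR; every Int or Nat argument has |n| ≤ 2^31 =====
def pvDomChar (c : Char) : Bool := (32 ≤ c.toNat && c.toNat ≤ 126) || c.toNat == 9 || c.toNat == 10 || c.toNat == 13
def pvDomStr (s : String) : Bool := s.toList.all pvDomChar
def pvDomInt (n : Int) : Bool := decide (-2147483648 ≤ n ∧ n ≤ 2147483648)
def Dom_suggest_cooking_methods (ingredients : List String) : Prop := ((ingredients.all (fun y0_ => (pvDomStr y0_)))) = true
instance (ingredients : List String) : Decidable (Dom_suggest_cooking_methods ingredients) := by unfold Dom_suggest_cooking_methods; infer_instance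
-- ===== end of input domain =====

-- B replaces A's per-method rescans of the keyword lists by a precomputed inverted
-- index keyword → set of method indices, probed once per ingredient (objective: alternative).

-- ===== PORT A =====
-- Python str.title(), ported by hand character by character (exact on the ASCII domain:
-- a letter following a non-letter is uppercased, any other letter lowercased).
def pvTitleChars : Bool → List Char → List Char
  | _, [] => []
  | prevCased, c :: rest =>
      if PySem.Chars.isalpha c then
        (if prevCased then PySem.Chars.lowerChar c else PySem.Chars.upperChar c) :: pvTitleChars true rest
      else
        c :: pvTitleChars false rest

def pvTitle (s : String) : String := String.mk (pvTitleChars false s.toList)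

-- the literal dict from A's body
def pvMappings : List (String × List String) :=
  [("stir_fry", ["vegetables", "bell pepper", "broccoli", "carrot"]),
   ("salad", ["lettuce", "cucumber", "tomato", "avocado"]),
   ("soup", ["onion", "carrot", "celery", "broth"]),
   ("pasta", ["pasta", "noodles", "tomato", "cheese"]),
   ("grilling", ["chicken", "beef", "fish", "vegetables"]),
   ("baking", ["chicken", "fish", "potato", "vegetables"]),
   ("steaming", ["broccoli", "cauliflower", "fish", "vegetables"]),
   ("roasting", ["potato", "carrot", "chicken", "beef"])]

def suggest_cooking_methods (ingredients : List String) : List String :=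
  let ingredientSet : PySem.Set String := PySem.Set.ofList (ingredients.map PySem.Str.lower)
  pvMappings.foldl
    (fun cooking_methods p =>
      if p.2.any (fun ing => PySem.Set.contains ingredientSet ing) then
        cooking_methods ++ [pvTitle (PySem.Str.replace p.1 "_" " ")]
      else cooking_methods)
    []

-- ===== PORT B =====
-- Source B's module constants: the precomputed display names and the inverted index
def pvMethodNames : List String :=
  ["Stir Fry", "Salad", "Soup", "Pasta", "Grilling", "Baking", "Steaming", "Roasting"]

def pvKeywordMethods : PySem.Dict String (PySem.Set Int) :=
  PySem.Dict.mk
  [("vegetables", PySem.Set.ofList ([0, 4, 5, 6] : List Int)),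
   ("bell pepper", PySem.Set.ofList [0]),
   ("broccoli", PySem.Set.ofList [0, 6]),
   ("carrot", PySem.Set.ofList [0, 2, 7]),
   ("lettuce", PySem.Set.ofList [1]),
   ("cucumber", PySem.Set.ofList [1]),
   ("tomato", PySem.Set.ofList [1, 3]),
   ("avocado", PySem.Set.ofList [1]),
   ("onion", PySem.Set.ofList [2]),
   ("celery", PySem.Set.ofList [2]),
   ("broth", PySem.Set.ofList [2]),
   ("pasta", PySem.Set.ofList [3]),
   ("noodles", PySem.Set.ofList [3]),
   ("cheese", PySem.Set.ofList [3]),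
   ("chicken", PySem.Set.ofList [4, 5, 7]),
   ("beef", PySem.Set.ofList [4, 7]),
   ("fish", PySem.Set.ofList [4, 5, 6]),
   ("potato", PySem.Set.ofList [5, 7]),
   ("cauliflower", PySem.Set.ofList [6])]

def suggest_cooking_methods_alt (ingredients : List String) : List String :=
  let triggered : PySem.Set Int :=
    ingredients.foldl
      (fun s ing => PySem.Set.union s (pvKeywordMethods.getD (PySem.Str.lower ing) PySem.Set.empty))
      PySem.Set.empty
  (PySem.List.enumerate pvMethodNames).filterMap
    (fun q => if PySem.Set.contains triggered q.1 then some q.2 else none)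

-- ===== PRECONDITION & SPEC =====
def Spec_suggest_cooking_methods (ingredients : List String) (out : List String) : Prop := out = suggest_cooking_methods_alt ingredients
instance (ingredients : List String) (out : List String) : Decidable (Spec_suggest_cooking_methods ingredients out) := by unfold Spec_suggest_cooking_methods; infer_instance

-- ===== CLAIM (what is proved, stated in full; the proofs are below) =====
def Claim_equal_suggest_cooking_methods : Prop := ∀ (ingredients : List String), Dom_suggest_cooking_methods ingredients → Spec_suggest_cooking_methods ingredients (suggest_cooking_methods ingredients)

-- ===== LEMMAS AND PROOFS =====

-- the inverted index as a plain lookup function (proof helper)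
def pvIdx (t : String) : List Int :=
  if t = "vegetables" then [0, 4, 5, 6]
  else if t = "bell pepper" then [0]
  else if t = "broccoli" then [0, 6]
  else if t = "carrot" then [0, 2, 7]
  else if t = "lettuce" then [1]
  else if t = "cucumber" then [1]
  else if t = "tomato" then [1, 3]
  else if t = "avocado" then [1]
  else if t = "onion" then [2]
  else if t = "celery" then [2]
  else if t = "broth" then [2]
  else if t = "pasta" then [3]
  else if t = "noodles" then [3]
  else if t = "cheese" then [3]
  else if t = "chicken" then [4, 5, 7]
  else if t = "beef" then [4, 7]
  else if t = "fish" then [4, 5, 6]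
  else if t = "potato" then [5, 7]
  else if t = "cauliflower" then [6]
  else []

set_option maxRecDepth 8192 in
lemma pvKeywordMethods_keys : pvKeywordMethods.keys = ["vegetables", "bell pepper", "broccoli", "carrot", "lettuce", "cucumber", "tomato", "avocado", "onion", "celery", "broth", "pasta", "noodles", "cheese", "chicken", "beef", "fish", "potato", "cauliflower"] := by decide

set_option maxRecDepth 8192 in
set_option maxHeartbeats 2000000 in
lemma pvKeywordMethods_getD (t : String) : pvKeywordMethods.getD t PySem.Set.empty = pvIdx t := by
  by_cases h1 : t = "vegetables"
  · subst h1; decide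
  by_cases h2 : t = "bell pepper"
  · subst h2; decide
  by_cases h3 : t = "broccoli"
  · subst h3; decide
  by_cases h4 : t = "carrot"
  · subst h4; decide
  by_cases h5 : t = "lettuce"
  · subst h5; decide
  by_cases h6 : t = "cucumber"
  · subst h6; decide
  by_cases h7 : t = "tomato"
  · subst h7; decide
  by_cases h8 : t = "avocado"
  · subst h8; decide
  by_cases h9 : t = "onion"
  · subst h9; decide
  by_cases h10 : t = "celery"
  · subst h10; decide
  by_cases h11 : t = "broth"
  · subst h11; decide
  by_cases h12 : t = "pasta"
  · subst h12; decide
  by_cases h13 : t = "noodles"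
  · subst h13; decide
  by_cases h14 : t = "cheese"
  · subst h14; decide
  by_cases h15 : t = "chicken"
  · subst h15; decide
  by_cases h16 : t = "beef"
  · subst h16; decide
  by_cases h17 : t = "fish"
  · subst h17; decide
  by_cases h18 : t = "potato"
  · subst h18; decide
  by_cases h19 : t = "cauliflower"
  · subst h19; decide
  rw [show pvIdx t = [] from by unfold pvIdx; simp [h1, h2, h3, h4, h5, h6, h7, h8, h9, h10, h11, h12, h13, h14, h15, h16, h17, h18, h19]]
  rw [PySem.Dict.getD_eq_get?_getD,
      show pvKeywordMethods.get? t = none from by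
        rw [PySem.Dict.get?_eq_none_iff_not_mem_keys, pvKeywordMethods_keys]
        simp [h1, h2, h3, h4, h5, h6, h7, h8, h9, h10, h11, h12, h13, h14, h15, h16, h17, h18, h19]]
  rfl

-- the inverted index agrees with A's table: index k triggers on t iff t is among method k's keywords
lemma pvIdx_mem (t : String) (k : Int) (kws : List String)
    (hq : (k, kws) ∈ (PySem.List.enumerate pvMappings).map (fun q => (q.1, q.2.2))) :
    k ∈ pvIdx t ↔ t ∈ kws := by
  rw [show (PySem.List.enumerate pvMappings).map (fun q => (q.1, q.2.2)) =
      [((0 : Int), ["vegetables", "bell pepper", "broccoli", "carrot"]),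
       (1, ["lettuce", "cucumber", "tomato", "avocado"]),
       (2, ["onion", "carrot", "celery", "broth"]),
       (3, ["pasta", "noodles", "tomato", "cheese"]),
       (4, ["chicken", "beef", "fish", "vegetables"]),
       (5, ["chicken", "fish", "potato", "vegetables"]),
       (6, ["broccoli", "cauliflower", "fish", "vegetables"]),
       (7, ["potato", "carrot", "chicken", "beef"])] from by decide] at hq
  by_cases h : t ∈ pvKeywordMethods.keys
  · rw [pvKeywordMethods_keys] at h
    simp only [List.mem_cons, List.not_mem_nil, or_false] at h
    fin_cases hq <;>
      rcases h with rfl|rfl|rfl|rfl|rfl|rfl|rfl|rfl|rfl|rfl|rfl|rfl|rfl|rfl|rfl|rfl|rfl|rfl|rfl <;>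
      decide
  · rw [pvKeywordMethods_keys] at h
    simp only [List.mem_cons, List.not_mem_nil, or_false] at h
    push Not at h
    obtain ⟨h1, h2, h3, h4, h5, h6, h7, h8, h9, h10, h11, h12, h13, h14, h15, h16, h17, h18, h19⟩ := h
    rw [show pvIdx t = [] from by unfold pvIdx; simp [h1, h2, h3, h4, h5, h6, h7, h8, h9, h10, h11, h12, h13, h14, h15, h16, h17, h18, h19]]
    fin_cases hq <;> simp [h1, h2, h3, h4, h5, h6, h7, h8, h9, h10, h11, h12, h13, h14, h15, h16, h17, h18, h19]

-- membership through B's union-accumulating fold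
lemma pvMem_foldl_union {α β : Type} [BEq α] [LawfulBEq α] (l : List β) (f : β → PySem.Set α)
    (s0 : PySem.Set α) (m : α) :
    m ∈ l.foldl (fun s x => PySem.Set.union s (f x)) s0 ↔ m ∈ s0 ∨ ∃ x ∈ l, m ∈ f x := by
  induction l generalizing s0 with
  | nil => simp
  | cons a l ih => simp [List.foldl_cons, ih, PySem.Set.mem_union, or_assoc]

-- a comprehension with a filter is filter-then-map
lemma pvFilterMap_ite {α β : Type} (l : List α) (q : α → Bool) (F : α → β) :
    l.filterMap (fun x => if q x then some (F x) else none) = (l.filter q).map F := by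
  induction l with
  | nil => rfl
  | cons a l ih =>
    by_cases h : q a <;> simp [h, ih]

-- two filterMaps over same-length lists agree index by index (stated via getElem?)
lemma pvFilterMap_congr_idx {α β γ : Type} (l1 : List α) (l2 : List β)
    (f : α → Option γ) (g : β → Option γ) (hlen : l1.length = l2.length)
    (h : ∀ k, k < l1.length → l1[k]?.bind f = l2[k]?.bind g) :
    l1.filterMap f = l2.filterMap g := by
  induction l1 generalizing l2 with
  | nil => cases l2 with
    | nil => rfl
    | cons b l2 => simp at hlen
  | cons a l1 ih =>
    cases l2 with
    | nil => simp at hlen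
    | cons b l2 =>
      have h0 := h 0 (by simp)
      simp only [List.getElem?_cons_zero, Option.bind_some] at h0
      simp only [List.filterMap_cons, h0]
      have hrest := ih l2 (by simpa using hlen)
        (fun k hk => by simpa using h (k + 1) (by simpa using Nat.succ_lt_succ hk))
      cases g b <;> simp [hrest]

-- one aligned entry: A's test-and-title on (kname, kws) agrees with B's membership test on (k, nm)
lemma pvCase (ings : List String) (k : Int) (kname : String) (kws : List String) (nm : String)
    (h1 : pvTitle (PySem.Str.replace kname "_" " ") = nm)
    (h2 : ∀ t, k ∈ pvIdx t ↔ t ∈ kws) :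
    (if kws.any (fun kw => PySem.Set.contains (PySem.Set.ofList (ings.map PySem.Str.lower)) kw) then
        some (pvTitle (PySem.Str.replace kname "_" " ")) else none) =
    (if PySem.Set.contains
        (ings.foldl (fun s ing =>
          PySem.Set.union s (pvKeywordMethods.getD (PySem.Str.lower ing) PySem.Set.empty))
          PySem.Set.empty) k then some nm else none) := by
  have hb : (kws.any (fun kw => PySem.Set.contains (PySem.Set.ofList (ings.map PySem.Str.lower)) kw)) =
      PySem.Set.contains
        (ings.foldl (fun s ing =>
          PySem.Set.union s (pvKeywordMethods.getD (PySem.Str.lower ing) PySem.Set.empty))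
          PySem.Set.empty) k := by
    rw [Bool.eq_iff_iff, List.any_eq_true, PySem.Set.contains_iff, pvMem_foldl_union]
    simp only [PySem.Set.contains_iff, PySem.Set.mem_ofList, List.mem_map, pvKeywordMethods_getD]
    constructor
    · rintro ⟨kw, hkw, a, ha, rfl⟩
      exact Or.inr ⟨a, ha, (h2 _).mpr hkw⟩
    · rintro (h | ⟨x, hx, hm⟩)
      · simp [PySem.Set.empty] at h
      · exact ⟨_, (h2 _).mp hm, x, hx, rfl⟩
  rw [hb, h1]

-- ===== VERDICT (by name: the statement is the Claim_ definition above) =====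
theorem suggest_cooking_methods_spec : Claim_equal_suggest_cooking_methods := by
  intro ings _
  show suggest_cooking_methods ings = suggest_cooking_methods_alt ings
  unfold suggest_cooking_methods suggest_cooking_methods_alt
  rw [PySem.List.foldl_append_if, List.nil_append, ← pvFilterMap_ite]
  apply pvFilterMap_congr_idx _ _ _ _ (by decide)
  intro k hk
  have hk8 : k < 8 := by simpa [pvMappings] using hk
  interval_cases k
  · exact pvCase ings 0 "stir_fry" ["vegetables", "bell pepper", "broccoli", "carrot"] "Stir Fry"
      (by decide) (fun t => pvIdx_mem t 0 _ (by decide))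
  · exact pvCase ings 1 "salad" ["lettuce", "cucumber", "tomato", "avocado"] "Salad"
      (by decide) (fun t => pvIdx_mem t 1 _ (by decide))
  · exact pvCase ings 2 "soup" ["onion", "carrot", "celery", "broth"] "Soup"
      (by decide) (fun t => pvIdx_mem t 2 _ (by decide))
  · exact pvCase ings 3 "pasta" ["pasta", "noodles", "tomato", "cheese"] "Pasta"
      (by decide) (fun t => pvIdx_mem t 3 _ (by decide))
  · exact pvCase ings 4 "grilling" ["chicken", "beef", "fish", "vegetables"] "Grilling"
      (by decide) (fun t => pvIdx_mem t 4 _ (by decide))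
  · exact pvCase ings 5 "baking" ["chicken", "fish", "potato", "vegetables"] "Baking"
      (by decide) (fun t => pvIdx_mem t 5 _ (by decide))
  · exact pvCase ings 6 "steaming" ["broccoli", "cauliflower", "fish", "vegetables"] "Steaming"
      (by decide) (fun t => pvIdx_mem t 6 _ (by decide))
  · exact pvCase ings 7 "roasting" ["potato", "carrot", "chicken", "beef"] "Roasting"
      (by decide) (fun t => pvIdx_mem t 7 _ (by decide))
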